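-- pv_equiv track=rewrite | github.com/girhoz/NewsClassification | KamusNews.py | getNotClass
-- ===== SOURCE A (Python) =====
-- def getNotClass(f1,f2,f3,f4,f5,f6,f7,f8,f9,f10,f11,f12):
--     notf1 = {}
--     jumlah, total = 0,0
--     for item in f1:
--         if item in f2:
--             jumlah = f2[item]
--             total = total + jumlah
--         if item in f3:
--             jumlah = f3[item]
--             total = total + jumlah
--         if item in f4:
--             jumlah = f4[item]
--             total = total + jumlah
--         if item in f5:
--             jumlah = f5[item]
--             total = total + jumlah
--         if item in f6:
--             jumlah = f6[item]
--             total = total + jumlah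
--         if item in f7:
--             jumlah = f7[item]
--             total = total + jumlah
--         if item in f8:
--             jumlah = f8[item]
--             total = total + jumlah
--         if item in f9:
--             jumlah = f9[item]
--             total = total + jumlah
--         if item in f10:
--             jumlah = f10[item]
--             total = total + jumlah
--         if item in f11:
--             jumlah = f11[item]
--             total = total + jumlah
--         if item in f12:
--             jumlah = f12[item]
--             total = total + jumlah
--         if total != 0:
--             notf1[item] = total
--         total = 0
--     return notf1
-- ===== SOURCE B (Python) =====
-- def getNotClass(f1,f2,f3,f4,f5,f6,f7,f8,f9,f10,f11,f12):
--     acc = {}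
--     for d in (f2,f3,f4,f5,f6,f7,f8,f9,f10,f11,f12):
--         for k, v in d.items():
--             acc[k] = acc.get(k, 0) + v
--     return {k: acc[k] for k in f1 if acc.get(k, 0) != 0}
-- ===== Notes on version B (the rewrite author's own statement) =====
-- stated objective: alternative
-- what changed: Instead of re-testing each f1 key against all eleven dicts with per-key if-chains, B first merges f2..f12 into one accumulator dict of per-key totals and then builds the result in a single comprehension over f1 keeping nonzero totals.
import Mathlib
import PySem

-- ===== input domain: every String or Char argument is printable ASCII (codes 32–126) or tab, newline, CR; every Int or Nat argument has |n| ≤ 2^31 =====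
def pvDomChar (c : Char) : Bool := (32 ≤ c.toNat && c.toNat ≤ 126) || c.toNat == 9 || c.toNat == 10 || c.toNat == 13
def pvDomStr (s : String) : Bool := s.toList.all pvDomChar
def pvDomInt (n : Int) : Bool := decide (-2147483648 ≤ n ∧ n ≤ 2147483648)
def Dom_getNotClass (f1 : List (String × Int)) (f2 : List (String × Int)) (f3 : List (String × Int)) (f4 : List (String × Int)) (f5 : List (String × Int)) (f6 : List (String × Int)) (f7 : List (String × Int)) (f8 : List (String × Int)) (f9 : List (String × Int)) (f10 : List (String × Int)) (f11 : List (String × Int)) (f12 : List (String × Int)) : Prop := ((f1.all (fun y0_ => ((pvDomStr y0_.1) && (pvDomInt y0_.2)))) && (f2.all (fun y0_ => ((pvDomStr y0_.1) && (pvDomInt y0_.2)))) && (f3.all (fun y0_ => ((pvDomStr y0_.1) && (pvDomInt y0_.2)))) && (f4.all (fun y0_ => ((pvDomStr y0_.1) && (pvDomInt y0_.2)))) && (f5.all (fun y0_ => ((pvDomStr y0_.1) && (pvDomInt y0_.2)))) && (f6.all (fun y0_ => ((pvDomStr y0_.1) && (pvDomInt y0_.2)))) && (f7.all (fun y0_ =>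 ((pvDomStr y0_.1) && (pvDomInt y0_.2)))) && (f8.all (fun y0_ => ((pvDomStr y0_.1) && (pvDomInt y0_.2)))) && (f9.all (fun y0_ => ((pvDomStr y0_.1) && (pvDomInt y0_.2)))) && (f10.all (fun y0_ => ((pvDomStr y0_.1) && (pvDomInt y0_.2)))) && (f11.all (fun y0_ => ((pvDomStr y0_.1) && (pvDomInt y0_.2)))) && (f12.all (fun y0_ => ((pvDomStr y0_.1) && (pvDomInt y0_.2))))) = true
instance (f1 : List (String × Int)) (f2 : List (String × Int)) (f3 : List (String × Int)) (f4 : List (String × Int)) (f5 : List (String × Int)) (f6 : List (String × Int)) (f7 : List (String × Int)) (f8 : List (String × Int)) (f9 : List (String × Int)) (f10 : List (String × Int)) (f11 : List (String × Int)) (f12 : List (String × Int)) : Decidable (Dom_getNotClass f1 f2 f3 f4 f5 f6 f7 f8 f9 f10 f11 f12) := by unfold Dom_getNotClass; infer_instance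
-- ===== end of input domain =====

-- B merges f2..f12 once into a per-key total accumulator and then filters f1 in a single pass,
-- instead of A's chain of eleven membership tests per f1 key; return values proved equal.

-- ===== PORT A =====
-- one 'if item in fi: jumlah = fi[item]; total = total + jumlah' block
def pvStepA (d : PySem.Dict String Int) (k : String) (total : Int) : Int :=
  if d.contains k then total + ((d.get? k).getD 0) else total

def getNotClass (f1 : List (String × Int)) (f2 : List (String × Int)) (f3 : List (String × Int)) (f4 : List (String × Int)) (f5 : List (String × Int)) (f6 : List (String × Int)) (f7 : List (String × Int)) (f8 : List (String × Int)) (f9 : List (String × Int)) (f10 : List (String × Int)) (f11 : List (String × Int)) (f12 : List (String × Int)) : List (String × Int) :=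
  let d2 := PySem.Dict.mk f2
  let d3 := PySem.Dict.mk f3
  let d4 := PySem.Dict.mk f4
  let d5 := PySem.Dict.mk f5
  let d6 := PySem.Dict.mk f6
  let d7 := PySem.Dict.mk f7
  let d8 := PySem.Dict.mk f8
  let d9 := PySem.Dict.mk f9
  let d10 := PySem.Dict.mk f10
  let d11 := PySem.Dict.mk f11
  let d12 := PySem.Dict.mk f12
  (f1.foldl (fun notf1 item =>
      let total : Int := 0
      let total := pvStepA d2 item.1 total
      let total := pvStepA d3 item.1 total
      let total := pvStepA d4 item.1 total
      let total := pvStepA d5 item.1 total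
      let total := pvStepA d6 item.1 total
      let total := pvStepA d7 item.1 total
      let total := pvStepA d8 item.1 total
      let total := pvStepA d9 item.1 total
      let total := pvStepA d10 item.1 total
      let total := pvStepA d11 item.1 total
      let total := pvStepA d12 item.1 total
      if total ≠ 0 then notf1.insert item.1 total else notf1)
    PySem.Dict.empty).items

-- ===== PORT B =====
-- inner loop 'for k, v in d.items(): acc[k] = acc.get(k, 0) + v'
def pvAddDict (acc : PySem.Dict String Int) (d : List (String × Int)) : PySem.Dict String Int :=
  d.foldl (fun a p => a.insert p.1 (a.getD p.1 0 + p.2)) acc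

def getNotClass_alt (f1 : List (String × Int)) (f2 : List (String × Int)) (f3 : List (String × Int)) (f4 : List (String × Int)) (f5 : List (String × Int)) (f6 : List (String × Int)) (f7 : List (String × Int)) (f8 : List (String × Int)) (f9 : List (String × Int)) (f10 : List (String × Int)) (f11 : List (String × Int)) (f12 : List (String × Int)) : List (String × Int) :=
  let acc := [f2, f3, f4, f5, f6, f7, f8, f9, f10, f11, f12].foldl pvAddDict PySem.Dict.empty
  (f1.foldl (fun r item =>
      if acc.getD item.1 0 ≠ 0 then r.insert item.1 (acc.getD item.1 0) else r)
    PySem.Dict.empty).items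

-- ===== PRECONDITION & SPEC =====
-- Pre_ requires the keys of each summed dict f2..f12 to be distinct: the assoc-list encoding otherwise admits
-- inputs that represent no Python dict (getNotClass's Python arguments are dicts, whose keys are
-- always unique), so no input the Python A returns on is excluded.
def Pre_getNotClass (f1 : List (String × Int)) (f2 : List (String × Int)) (f3 : List (String × Int)) (f4 : List (String × Int)) (f5 : List (String × Int)) (f6 : List (String × Int)) (f7 : List (String × Int)) (f8 : List (String × Int)) (f9 : List (String × Int)) (f10 : List (String × Int)) (f11 : List (String × Int)) (f12 : List (String × Int)) : Prop :=
  (f2.map Prod.fst).Nodup ∧ (f3.map Prod.fst).Nodup ∧ (f4.map Prod.fst).Nodup ∧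
  (f5.map Prod.fst).Nodup ∧ (f6.map Prod.fst).Nodup ∧ (f7.map Prod.fst).Nodup ∧
  (f8.map Prod.fst).Nodup ∧ (f9.map Prod.fst).Nodup ∧ (f10.map Prod.fst).Nodup ∧
  (f11.map Prod.fst).Nodup ∧ (f12.map Prod.fst).Nodup
instance (f1 : List (String × Int)) (f2 : List (String × Int)) (f3 : List (String × Int)) (f4 : List (String × Int)) (f5 : List (String × Int)) (f6 : List (String × Int)) (f7 : List (String × Int)) (f8 : List (String × Int)) (f9 : List (String × Int)) (f10 : List (String × Int)) (f11 : List (String × Int)) (f12 : List (String × Int)) : Decidable (Pre_getNotClass f1 f2 f3 f4 f5 f6 f7 f8 f9 f10 f11 f12) := by unfold Pre_getNotClass; infer_instance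

def pvWitness_getNotClass : (List (String × Int)) × (List (String × Int)) × (List (String × Int)) × (List (String × Int)) × (List (String × Int)) × (List (String × Int)) × (List (String × Int)) × (List (String × Int)) × (List (String × Int)) × (List (String × Int)) × (List (String × Int)) × (List (String × Int)) :=
  ([("a", 1), ("b", 2)], [("a", 3)], [("b", -1)], [], [], [], [], [], [], [], [], [("a", 2)])

def Spec_getNotClass (f1 : List (String × Int)) (f2 : List (String × Int)) (f3 : List (String × Int)) (f4 : List (String × Int)) (f5 : List (String × Int)) (f6 : List (String × Int)) (f7 : List (String × Int)) (f8 : List (String × Int)) (f9 : List (String × Int)) (f10 : List (String × Int)) (f11 : List (String × Int)) (f12 : List (String × Int)) (out : List (String × Int)) : Prop := out = getNotClass_alt f1 f2 f3 f4 f5 f6 f7 f8 f9 f10 f11 f12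
instance (f1 : List (String × Int)) (f2 : List (String × Int)) (f3 : List (String × Int)) (f4 : List (String × Int)) (f5 : List (String × Int)) (f6 : List (String × Int)) (f7 : List (String × Int)) (f8 : List (String × Int)) (f9 : List (String × Int)) (f10 : List (String × Int)) (f11 : List (String × Int)) (f12 : List (String × Int)) (out : List (String × Int)) : Decidable (Spec_getNotClass f1 f2 f3 f4 f5 f6 f7 f8 f9 f10 f11 f12 out) := by unfold Spec_getNotClass; infer_instance

-- ===== CLAIM (what is proved, stated in full; the proofs are below) =====
def Claim_equal_getNotClass : Prop := ∀ (f1 : List (String × Int)) (f2 : List (String × Int)) (f3 : List (String × Int)) (f4 : List (String × Int)) (f5 : List (String × Int)) (f6 : List (String × Int)) (f7 : List (String × Int)) (f8 : List (String × Int)) (f9 : List (String × Int)) (f10 : List (String × Int)) (f11 : List (String × Int)) (f12 : List (String × Int)), Dom_getNotClass f1 f2 f3 f4 f5 f6 f7 f8 f9 f10 f11 f12 → Pre_getNotClass f1 f2 f3 f4 f5 f6 f7 f8 f9 f10 f11 f12 → Spec_getNotClass f1 f2 f3 f4 f5 f6 f7 f8 f9 f10 f11 f12 (getNotClass f1 f2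 f3 f4 f5 f6 f7 f8 f9 f10 f11 f12)

-- ===== LEMMAS AND PROOFS =====
theorem get?_mk_nm (d : List (String × Int)) (k : String) (h : k ∉ d.map Prod.fst) :
    (PySem.Dict.mk d).get? k = none := by
  induction d with
  | nil => rfl
  | cons q t iht =>
    simp only [List.map_cons, List.mem_cons, not_or] at h
    rw [PySem.Dict.get?_mk_cons]
    have hb : (q.1 == k) = false := beq_eq_false_iff_ne.mpr (fun e => h.1 e.symm)
    simp [hb, iht h.2]

theorem getD_mk_nm (d : List (String × Int)) (k : String) (h : k ∉ d.map Prod.fst) :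
    (PySem.Dict.mk d).getD k 0 = 0 := by
  rw [PySem.Dict.getD_eq_get?_getD, get?_mk_nm d k h]; rfl

-- one A-step adds exactly the dict's value-or-default at the key
theorem pvStepA_eq (d : PySem.Dict String Int) (k : String) (t : Int) :
    pvStepA d k t = t + d.getD k 0 := by
  unfold pvStepA
  by_cases h : d.contains k = true
  · simp [h, PySem.Dict.getD_eq_get?_getD]
  · rw [Bool.not_eq_true] at h
    simp [pysem, h]

-- merging one nodup-keyed dict into acc adds that dict's lookup value at every key
theorem pvAddDict_getD (d : List (String × Int)) (acc : PySem.Dict String Int)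
    (h : (d.map Prod.fst).Nodup) (k : String) :
    (pvAddDict acc d).getD k 0 = acc.getD k 0 + (PySem.Dict.mk d).getD k 0 := by
  induction d generalizing acc with
  | nil =>
    rw [getD_mk_nm [] k (by simp)]
    simp [pvAddDict]
  | cons p rest ih =>
    simp only [List.map_cons, List.nodup_cons] at h
    rw [show pvAddDict acc (p :: rest) = pvAddDict (acc.insert p.1 (acc.getD p.1 0 + p.2)) rest from rfl,
        ih _ h.2,
        PySem.Dict.getD_eq_get?_getD (PySem.Dict.mk (p :: rest)) k 0, PySem.Dict.get?_mk_cons]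
    by_cases hk : k = p.1
    · subst hk
      rw [getD_mk_nm rest p.1 h.1, PySem.Dict.getD_insert_self]
      simp
    · have hb : (p.1 == k) = false := beq_eq_false_iff_ne.mpr (fun e => hk e.symm)
      rw [PySem.Dict.getD_insert]
      simp [hb, hk, PySem.Dict.getD_eq_get?_getD]

-- ===== VERDICT (by name: the statement is the Claim_ definition above) =====
theorem getNotClass_spec : Claim_equal_getNotClass := by
  intro f1 f2 f3 f4 f5 f6 f7 f8 f9 f10 f11 f12 _hdom hpre
  obtain ⟨h2, h3, h4, h5, h6, h7, h8, h9, h10, h11, h12⟩ := hpre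
  show getNotClass f1 f2 f3 f4 f5 f6 f7 f8 f9 f10 f11 f12 = getNotClass_alt f1 f2 f3 f4 f5 f6 f7 f8 f9 f10 f11 f12
  unfold getNotClass getNotClass_alt
  simp only [List.foldl_cons, List.foldl_nil]
  have hacc : ∀ k : String,
      (pvAddDict (pvAddDict (pvAddDict (pvAddDict (pvAddDict (pvAddDict (pvAddDict (pvAddDict (pvAddDict (pvAddDict (pvAddDict PySem.Dict.empty f2) f3) f4) f5) f6) f7) f8) f9) f10) f11) f12).getD k 0
      = 0 + (PySem.Dict.mk f2).getD k 0 + (PySem.Dict.mk f3).getD k 0 + (PySem.Dict.mk f4).getD k 0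
          + (PySem.Dict.mk f5).getD k 0 + (PySem.Dict.mk f6).getD k 0 + (PySem.Dict.mk f7).getD k 0
          + (PySem.Dict.mk f8).getD k 0 + (PySem.Dict.mk f9).getD k 0 + (PySem.Dict.mk f10).getD k 0
          + (PySem.Dict.mk f11).getD k 0 + (PySem.Dict.mk f12).getD k 0 := by
    intro k
    rw [pvAddDict_getD f12 _ h12 k, pvAddDict_getD f11 _ h11 k, pvAddDict_getD f10 _ h10 k,
        pvAddDict_getD f9 _ h9 k, pvAddDict_getD f8 _ h8 k, pvAddDict_getD f7 _ h7 k,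
        pvAddDict_getD f6 _ h6 k, pvAddDict_getD f5 _ h5 k, pvAddDict_getD f4 _ h4 k,
        pvAddDict_getD f3 _ h3 k, pvAddDict_getD f2 _ h2 k, PySem.Dict.getD_empty]
  congr 1
  congr 1
  funext r item
  simp only [pvStepA_eq, hacc]
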